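-- pv_equiv track=rewrite | github.com/YagoRizzetti/AlgoritmosYEstructurasDeDatos1 | PrimerCuatrimestre/SegundoParcial/82121_RizzettiYago/funciones.py | controlt
-- ===== SOURCE A (Python) =====
-- def controlt(x):
--     tienet = False
--     countl = 0
--     countptt = 0
--     for i in x:
--         if i == " " or i == ".":
--             if countl > 4 and tienet:
--                 countptt += 1
--             countl = 0
--             tienet = False
--         else:
--             countl +=1
--             if i == "t":
--                 tienet = True
--     return countptt
-- ===== SOURCE B (Python) =====
-- def controlt(x):
--     # Build the list of delimiter-terminated words, then count the long ones with a 't'.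
--     words = []
--     cur = ""
--     for ch in x:
--         if ch in (" ", "."):
--             words.append(cur)
--             cur = ""
--         else:
--             cur = cur + ch
--     return sum(1 for w in words if len(w) > 4 and "t" in w)
-- ===== Notes on version B (the rewrite author's own statement) =====
-- stated objective: simpler
-- what changed: B decomposes the task into building the list of delimiter-terminated words and then counting those longer than 4 containing 't', replacing A's running per-word character counters and flag.
import Mathlib
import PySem

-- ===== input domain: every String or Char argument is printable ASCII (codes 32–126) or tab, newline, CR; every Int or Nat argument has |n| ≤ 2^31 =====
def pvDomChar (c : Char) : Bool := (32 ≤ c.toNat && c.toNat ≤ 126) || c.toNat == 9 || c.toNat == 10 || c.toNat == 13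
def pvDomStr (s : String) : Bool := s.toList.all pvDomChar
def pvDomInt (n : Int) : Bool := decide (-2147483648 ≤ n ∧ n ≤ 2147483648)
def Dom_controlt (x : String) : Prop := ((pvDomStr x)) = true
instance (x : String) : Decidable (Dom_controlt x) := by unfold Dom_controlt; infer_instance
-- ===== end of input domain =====

-- B builds the list of delimiter-terminated words and then counts, instead of A's running
-- per-character counters; objective: simpler/alternative decomposition, same cost.

-- ===== PORT A =====
-- state = (tienet, countl, countptt), exactly A's three loop variables
def controlt (x : String) : Int :=
  let st := x.toList.foldl
    (fun (st : Bool × Int × Int) i =>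
      if i = ' ' ∨ i = '.' then
        (false, 0, if st.2.1 > 4 ∧ st.1 = true then st.2.2 + 1 else st.2.2)
      else
        ((if i = 't' then true else st.1), st.2.1 + 1, st.2.2))
    (false, 0, 0)
  st.2.2

-- ===== PORT B =====
-- Source B: build (words, cur) in one pass, then sum(1 for w in words if len(w) > 4 and "t" in w)
def controlt_alt (x : String) : Int :=
  let st := x.toList.foldl
    (fun (st : List (List Char) × List Char) ch =>
      if ch = ' ' ∨ ch = '.' then (st.1 ++ [st.2], [])
      else (st.1, st.2 ++ [ch]))
    ([], [])
  (st.1.map (fun w => if 4 < w.length ∧ PySem.Chars.isIn ['t'] w = true then (1 : Int) else 0)).sum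

-- ===== PRECONDITION & SPEC =====
def Spec_controlt (x : String) (out : Int) : Prop := out = controlt_alt x
instance (x : String) (out : Int) : Decidable (Spec_controlt x out) := by unfold Spec_controlt; infer_instance

-- ===== CLAIM (what is proved, stated in full; the proofs are below) =====
def Claim_equal_controlt : Prop := ∀ (x : String), Dom_controlt x → Spec_controlt x (controlt x)

-- ===== LEMMAS AND PROOFS =====

def pvScore (w : List Char) : Int :=
  if 4 < w.length ∧ PySem.Chars.isIn ['t'] w = true then 1 else 0

lemma pvIsIn_singleton (c : Char) (w : List Char) :
    PySem.Chars.isIn [c] w = true ↔ c ∈ w := by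
  rw [PySem.Chars.isIn_iff_infix]
  constructor
  · intro h; exact (List.singleton_sublist.mp h.sublist)
  · intro h
    obtain ⟨s, t, rfl⟩ := List.append_of_mem h
    exact ⟨s, t, by simp⟩

lemma pvLoop (l : List Char) (words : List (List Char)) (cur : List Char) (acc : Int)
    (hacc : acc = (words.map pvScore).sum) :
    l.foldl
      (fun (st : Bool × Int × Int) i =>
        if i = ' ' ∨ i = '.' then
          (false, 0, if st.2.1 > 4 ∧ st.1 = true then st.2.2 + 1 else st.2.2)
        else
          ((if i = 't' then true else st.1), st.2.1 + 1, st.2.2))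
      (decide ('t' ∈ cur), (cur.length : Int), acc)
    = (let st := l.foldl
        (fun (st : List (List Char) × List Char) ch =>
          if ch = ' ' ∨ ch = '.' then (st.1 ++ [st.2], [])
          else (st.1, st.2 ++ [ch]))
        (words, cur)
       (decide ('t' ∈ st.2), (st.2.length : Int), (st.1.map pvScore).sum)) := by
  induction l generalizing words cur acc with
  | nil => simp [hacc]
  | cons c tl ih =>
    by_cases hc : c = ' ' ∨ c = '.'
    · simp only [List.foldl_cons, hc]
      have : (if (cur.length : Int) > 4 ∧ decide ('t' ∈ cur) = true then acc + 1 else acc)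
          = ((words ++ [cur]).map pvScore).sum := by
        simp only [List.map_append, List.sum_append, List.map, List.sum_cons, List.sum_nil,
          hacc, pvScore]
        by_cases h4 : 4 < cur.length ∧ PySem.Chars.isIn ['t'] cur = true
        · rw [if_pos h4, if_pos]
          · ring
          · refine ⟨by exact_mod_cast h4.1, by simp [(pvIsIn_singleton 't' cur).mp h4.2]⟩
        · rw [if_neg h4, if_neg]
          · ring
          · intro ⟨ha, hb⟩
            exact h4 ⟨by exact_mod_cast ha, (pvIsIn_singleton 't' cur).mpr (by simpa using hb)⟩
      rw [this]
      simpa using ih (words ++ [cur]) [] _ rfl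
    · simp only [List.foldl_cons, hc]
      have ht : (if c = 't' then true else decide ('t' ∈ cur)) = decide ('t' ∈ cur ++ [c]) := by
        by_cases h : c = 't' <;> simp [h, eq_comm]
      have hl : (cur.length : Int) + 1 = ((cur ++ [c]).length : Int) := by
        simp
      rw [ht, hl]
      exact ih words (cur ++ [c]) acc hacc

-- ===== VERDICT (by name: the statement is the Claim_ definition above) =====
theorem controlt_spec : Claim_equal_controlt := by
  intro x _
  show controlt x = controlt_alt x
  unfold controlt controlt_alt
  have h0 : ((false : Bool), (0 : Int), (0 : Int))
      = (decide ('t' ∈ ([] : List Char)), ((([] : List Char)).length : Int), (0 : Int)) := by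
    simp
  rw [h0, pvLoop x.toList [] [] 0 (by simp)]
  rfl
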